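-- pv_equiv track=rewrite | github.com/JayFoxRox/pykdclient | util.py | hexasc
-- ===== SOURCE A (Python) =====
-- def hexasc(buf):
--     """Returns an ASCII dump of the given byte array."""
--     length = len(buf)
--     if length == 0:
--         return None
--
--     count = 0
--     ascii_string = ""
--     out = "0000  "
--     for value in buf:
--         if isinstance(value, str):
--             codepoint = ord(value)
--         else:
--             codepoint = value
--         out += "%02x " % codepoint
--         if 0x1F < codepoint < 0x7F:
--             ascii_string += chr(codepoint)
--         else:
--             ascii_string += "."
--         count += 1
--         if (count % 16) == 0:
--             if count < length:
--                 out += " " + ascii_string + "\n%04x  " % count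
--             else:
--                 out += " " + ascii_string + "\n"
--             ascii_string = ""
--
--     padding = 0
--     if ascii_string:
--         padding = 48 - ((count % 16) * 3)
--
--     out += " " * padding
--     out += " " + ascii_string + "\n"
--     return out
-- ===== SOURCE B (Python) =====
-- def hexasc(buf):
--     """Returns an ASCII dump of the given byte array."""
--     if len(buf) == 0:
--         return None
--     lines = []
--     for offset in range(0, len(buf), 16):
--         chunk = buf[offset:offset + 16]
--         hexpart = ""
--         ascii_part = ""
--         for value in chunk:
--             codepoint = ord(value) if isinstance(value, str) else value
--             hexpart += "%02x " % codepoint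
--             ascii_part += chr(codepoint) if 0x1F < codepoint < 0x7F else "."
--         if len(chunk) < 16:
--             hexpart += " " * (48 - len(chunk) * 3)
--         lines.append("%04x  " % offset + hexpart + " " + ascii_part + "\n")
--     return "".join(lines)
-- ===== Notes on version B (the rewrite author's own statement) =====
-- stated objective: alternative
-- what changed: B replaces A's single flat loop with a mod-16 counter and mutable running line state by iterating over successive 16-byte chunks, building each output line independently and joining them.
-- intended difference: When the buffer length is a positive multiple of 16, A appends a spurious extra ' \n' line after the last full line (leftover of its unconditional trailer), while B ends the dump after the last data line, which is the intended hexdump format. — e.g. on hexasc([0,0,0,0,0,0,0,0,0,0,0,0,0,0,0,0]): A returns some "0000 00 00 00 00 00 00 00 00 00 00 00 00 00 00 00 00 ................\n \n", B returns some "0000 00 00 00 00 00 00 00 00 00 00 00 00 00 00 00 00 ................\n"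
import Mathlib
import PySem

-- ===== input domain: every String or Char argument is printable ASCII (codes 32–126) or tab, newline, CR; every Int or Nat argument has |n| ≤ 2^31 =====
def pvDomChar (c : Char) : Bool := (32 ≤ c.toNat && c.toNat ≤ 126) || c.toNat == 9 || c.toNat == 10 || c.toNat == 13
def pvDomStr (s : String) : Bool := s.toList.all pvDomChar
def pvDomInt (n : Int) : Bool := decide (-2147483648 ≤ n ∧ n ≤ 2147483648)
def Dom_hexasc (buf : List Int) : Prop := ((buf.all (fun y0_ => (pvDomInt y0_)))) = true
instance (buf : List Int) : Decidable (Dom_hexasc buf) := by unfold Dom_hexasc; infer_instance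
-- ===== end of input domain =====

-- B replaces A's flat loop with a mod-16 counter and mutable line state by iterating over
-- 16-byte chunks, building each line independently and joining them (alternative decomposition);
-- B deliberately omits A's spurious trailing ' \n' line on lengths that are multiples of 16.


-- ===== PORT A =====
-- shared helpers: Python's '%0<w>x' formatting of an int (sign first, zero-padded to width),
-- the '.'-or-chr ascii cell, and ' ' * k
def hexDigits (n : Nat) : String := String.ofList (Nat.toDigits 16 n)

def zfill (w : Nat) (s : String) : String :=
  String.ofList (List.replicate (w - s.length) '0') ++ s

def pyHexFmt (w : Nat) (n : Int) : String :=
  if n < 0 then "-" ++ zfill (w - 1) (hexDigits (-n).toNat) else zfill w (hexDigits n.toNat)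

def cpChar (cp : Int) : String :=
  if 0x1F < cp ∧ cp < 0x7F then String.ofList [Char.ofNat cp.toNat] else "."

def spaces (k : Nat) : String := String.ofList (List.replicate k ' ')

-- one iteration of A's 'for value in buf' loop over the state (count, ascii_string, out)
def stepA (length : Int) (s : Int × String × String) (value : Int) : Int × String × String :=
  let codepoint := value
  let out := s.2.2 ++ pyHexFmt 2 codepoint ++ " "
  let asc := s.2.1 ++ cpChar codepoint
  let count := s.1 + 1
  if PySem.Int.mod count 16 = 0 then
    if count < length then (count, "", out ++ " " ++ asc ++ "\n" ++ pyHexFmt 4 count ++ "  ")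
    else (count, "", out ++ " " ++ asc ++ "\n")
  else (count, asc, out)

def hexasc (buf : List Int) : Option String :=
  let length : Int := buf.length
  if length = 0 then none
  else
    let s := buf.foldl (stepA length) (0, "", "0000  ")
    let padding : Int := if s.2.1 ≠ "" then 48 - PySem.Int.mod s.1 16 * 3 else 0
    some (s.2.2 ++ spaces padding.toNat ++ " " ++ s.2.1 ++ "\n")

-- ===== PORT B =====
def chunkHex (chunk : List Int) : String :=
  chunk.foldl (fun h v => h ++ pyHexFmt 2 v ++ " ") ""

def chunkAsc (chunk : List Int) : String :=
  chunk.foldl (fun a v => a ++ cpChar v) ""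

-- Source B's 'for offset in range(0, len(buf), 16)' loop, one line per 16-byte chunk
def altLoop : List Int → Nat → String
  | [], _ => ""
  | r :: rest, offset =>
    let chunk := (r :: rest).take 16
    let hexpart := chunkHex chunk ++ (if chunk.length < 16 then spaces (48 - chunk.length * 3) else "")
    pyHexFmt 4 (offset : Int) ++ "  " ++ hexpart ++ " " ++ chunkAsc chunk ++ "\n" ++
      altLoop ((r :: rest).drop 16) (offset + 16)
termination_by l => l.length
decreasing_by simp

def hexasc_alt (buf : List Int) : Option String :=
  if buf.length = 0 then none
  else some (altLoop buf 0)

-- ===== PRECONDITION & SPEC =====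
-- On nonempty buffers whose length is a multiple of 16, A appends a spurious extra " \n" line
-- after the last full line (leftover of its unconditional trailer); B ends the dump after the
-- last data line, which is the intended hexdump format.
def D_hexasc (buf : List Int) : Prop := buf ≠ [] ∧ buf.length % 16 = 0
instance (buf : List Int) : Decidable (D_hexasc buf) := by unfold D_hexasc; infer_instance

def Spec_hexasc (buf : List Int) (out : Option String) : Prop := ¬ D_hexasc buf → out = hexasc_alt buf
instance (buf : List Int) (out : Option String) : Decidable (Spec_hexasc buf out) := by unfold Spec_hexasc; infer_instance

def pvDiffWitness_hexasc : List Int := [0,0,0,0,0,0,0,0,0,0,0,0,0,0,0,0]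
def pvDiffWitnessOut_hexasc : (Option String) × (Option String) :=
  (some "0000  00 00 00 00 00 00 00 00 00 00 00 00 00 00 00 00  ................\n \n",
   some "0000  00 00 00 00 00 00 00 00 00 00 00 00 00 00 00 00  ................\n")

-- ===== CLAIM (what is proved, stated in full; the proofs are below) =====
def Claim_unchanged_hexasc : Prop := ∀ (buf : List Int), Dom_hexasc buf → Spec_hexasc buf (hexasc buf)
def Claim_changed_hexasc : Prop := Dom_hexasc (pvDiffWitness_hexasc) ∧ D_hexasc (pvDiffWitness_hexasc) ∧ hexasc (pvDiffWitness_hexasc) = pvDiffWitnessOut_hexasc.1 ∧ hexasc_alt (pvDiffWitness_hexasc) = pvDiffWitnessOut_hexasc.2 ∧ pvDiffWitnessOut_hexasc.1 ≠ pvDiffWitnessOut_hexasc.2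
def Claim_exact_hexasc : Prop := ∀ (buf : List Int), Dom_hexasc buf → D_hexasc buf → hexasc buf ≠ hexasc_alt buf

-- ===== LEMMAS AND PROOFS =====

-- A's postprocessing after the loop (padding + final ' '+ascii+'\n')
def finalize (s : Int × String × String) : String :=
  s.2.2 ++ spaces (if s.2.1 ≠ "" then (48 : Int) - PySem.Int.mod s.1 16 * 3 else 0).toNat
    ++ " " ++ s.2.1 ++ "\n"

theorem chunkHex_from (a : String) (xs : List Int) :
    xs.foldl (fun h v => h ++ pyHexFmt 2 v ++ " ") a = a ++ chunkHex xs := by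
  induction xs generalizing a with
  | nil => simp [chunkHex]
  | cons x xs ih =>
      simp only [chunkHex, List.foldl_cons] at *
      rw [ih, ih ("" ++ pyHexFmt 2 x ++ " ")]
      simp [String.append_assoc]

theorem chunkAsc_from (a : String) (xs : List Int) :
    xs.foldl (fun h v => h ++ cpChar v) a = a ++ chunkAsc xs := by
  induction xs generalizing a with
  | nil => simp [chunkAsc]
  | cons x xs ih =>
      simp only [chunkAsc, List.foldl_cons] at *
      rw [ih, ih ("" ++ cpChar x)]
      simp [String.append_assoc]

theorem cpChar_len (x : Int) : (cpChar x).length = 1 := by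
  unfold cpChar; split <;> first | simp | decide

theorem chunkAsc_ne_empty (x : Int) (xs : List Int) : chunkAsc (x :: xs) ≠ "" := by
  intro h
  have h2 := congrArg String.length h
  simp only [chunkAsc, List.foldl_cons] at h2
  rw [chunkAsc_from] at h2
  rw [String.length_append, String.length_append, cpChar_len] at h2
  simp at h2

theorem stepA_no_emit (n : Int) (c : Nat) (asc out : String) (x : Int) (h : (c + 1) % 16 ≠ 0) :
    stepA n ((c : Int), asc, out)
      x = (((c + 1 : Nat) : Int), asc ++ cpChar x, out ++ pyHexFmt 2 x ++ " ") := by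
  have hc : (c : Int) + 1 = ((c + 1 : Nat) : Int) := by push_cast; ring
  have hne : ¬ (PySem.Int.mod ((c + 1 : Nat) : Int) 16 = 0) := by
    rw [PySem.Int.mod_eq_emod_of_pos (by norm_num)]
    omega
  simp only [stepA, hc]
  rw [if_neg hne]

theorem stepA_emit (n : Int) (c : Nat) (asc out : String) (x : Int) (h : (c + 1) % 16 = 0) :
    stepA n ((c : Int), asc, out) x
      = (((c + 1 : Nat) : Int), "",
         out ++ pyHexFmt 2 x ++ " " ++ " " ++ (asc ++ cpChar x) ++ "\n" ++
           (if ((c + 1 : Nat) : Int) < n then pyHexFmt 4 ((c + 1 : Nat) : Int) ++ "  " else "")) := by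
  have hc : (c : Int) + 1 = ((c + 1 : Nat) : Int) := by push_cast; ring
  have hpos : PySem.Int.mod ((c + 1 : Nat) : Int) 16 = 0 := by
    rw [PySem.Int.mod_eq_emod_of_pos (by norm_num)]
    omega
  simp only [stepA, hc]
  rw [if_pos hpos]
  split <;> simp [String.append_assoc]

theorem chunkAsc_cons (x : Int) (xs : List Int) : chunkAsc (x :: xs) = cpChar x ++ chunkAsc xs := by
  conv_lhs => rw [chunkAsc]
  rw [List.foldl_cons, chunkAsc_from ("" ++ cpChar x) xs]
  simp

theorem chunkHex_cons (x : Int) (xs : List Int) :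
    chunkHex (x :: xs) = pyHexFmt 2 x ++ " " ++ chunkHex xs := by
  conv_lhs => rw [chunkHex]
  rw [List.foldl_cons, chunkHex_from ("" ++ pyHexFmt 2 x ++ " ") xs]
  simp

theorem foldl_partial (n : Int) (xs : List Int) : ∀ (c : Nat) (asc out : String),
    c % 16 + xs.length < 16 →
    xs.foldl (stepA n) ((c : Int), asc, out)
      = (((c + xs.length : Nat) : Int), asc ++ chunkAsc xs, out ++ chunkHex xs) := by
  induction xs with
  | nil => intro c asc out _; simp [chunkAsc, chunkHex]
  | cons x xs ih =>
      intro c asc out h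
      simp only [List.length_cons] at h
      simp only [List.foldl_cons]
      rw [stepA_no_emit n c asc out x (by omega)]
      rw [ih (c + 1) _ _ (by omega)]
      simp [chunkAsc_cons, chunkHex_cons, String.append_assoc]
      omega

theorem foldl_full (n : Int) (xs : List Int) : ∀ (c : Nat) (asc out : String),
    c % 16 + xs.length = 16 →
    xs.foldl (stepA n) ((c : Int), asc, out)
      = (((c + xs.length : Nat) : Int), "",
         out ++ chunkHex xs ++ " " ++ (asc ++ chunkAsc xs) ++ "\n" ++
           (if ((c + xs.length : Nat) : Int) < n then pyHexFmt 4 ((c + xs.length : Nat) : Int) ++ "  " else "")) := by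
  induction xs with
  | nil => intro c asc out h; simp only [List.length_nil] at h; omega
  | cons x xs ih =>
      intro c asc out h
      simp only [List.length_cons] at h
      by_cases hxs : xs = []
      · subst hxs
        simp only [List.length_nil] at h
        simp only [List.foldl_cons, List.foldl_nil, List.length_cons, List.length_nil]
        rw [stepA_emit n c asc out x (by omega)]
        simp [chunkAsc, chunkHex, String.append_assoc]
      · have hlen : 1 ≤ xs.length := by
          cases xs with
          | nil => exact absurd rfl hxs
          | cons y ys => simp
        simp only [List.foldl_cons, List.length_cons]
        rw [stepA_no_emit n c asc out x (by omega)]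
        rw [ih (c + 1) _ _ (by omega)]
        have hc : c + 1 + xs.length = c + (xs.length + 1) := by omega
        simp [hc, chunkAsc_cons, chunkHex_cons, String.append_assoc]

theorem altLoop_cons (r : Int) (rs : List Int) (offset : Nat) :
    altLoop (r :: rs) offset
      = pyHexFmt 4 (offset : Int) ++ "  "
          ++ (chunkHex ((r :: rs).take 16)
              ++ (if ((r :: rs).take 16).length < 16 then spaces (48 - ((r :: rs).take 16).length * 3) else ""))
          ++ " " ++ chunkAsc ((r :: rs).take 16) ++ "\n"
          ++ altLoop ((r :: rs).drop 16) (offset + 16) := by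
  rw [altLoop]

theorem altLoop_nil (offset : Nat) : altLoop [] offset = "" := by rw [altLoop]

theorem main_loop (N : Nat) : ∀ (rest : List Int) (c : Nat) (out : String),
    rest.length ≤ N → rest ≠ [] → c % 16 = 0 →
    finalize (rest.foldl (stepA ((c : Int) + rest.length)) ((c : Int), "", out ++ pyHexFmt 4 (c : Int) ++ "  "))
      = out ++ altLoop rest c ++ (if rest.length % 16 = 0 then " \n" else "") := by
  induction N with
  | zero =>
      intro rest c out hN hne _
      cases rest with
      | nil => exact absurd rfl hne
      | cons r rs => simp at hN
  | succ N ih =>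
      intro rest c out hN hne hc
      cases rest with
      | nil => exact absurd rfl hne
      | cons r rs =>
        by_cases hlen : (r :: rs).length < 16
        · -- single partial chunk
          rw [foldl_partial ((c : Int) + ((r :: rs).length : Int)) (r :: rs) c ""
                (out ++ pyHexFmt 4 (c : Int) ++ "  ") (by omega)]
          have hasc : ("" : String) ++ chunkAsc (r :: rs) ≠ "" := by
            rw [String.empty_append]; exact chunkAsc_ne_empty r rs
          unfold finalize
          simp only
          rw [if_pos hasc]
          rw [PySem.Int.mod_eq_emod_of_pos (by norm_num)]
          have hpad : ((48 : Int) - ((c + (r :: rs).length : Nat) : Int) % 16 * 3).toNat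
              = 48 - (r :: rs).length * 3 := by
            simp only [List.length_cons] at *
            omega
          rw [hpad, altLoop_cons]
          rw [List.take_of_length_le (by omega), List.drop_eq_nil_of_le (by omega)]
          rw [if_pos hlen, if_neg (by simp only [List.length_cons] at *; omega)]
          simp [String.append_assoc, altLoop_nil]
        · -- a full leading chunk
          have htl : ((r :: rs).take 16).length = 16 := by
            simp only [List.length_take]; omega
          have hn : ((c : Int) + ((r :: rs).length : Int))
              = (((c + 16 : Nat) : Int) + (((r :: rs).drop 16).length : Int)) := by
            simp only [List.length_drop]; push_cast; omega
          have hmod : (r :: rs).length % 16 = ((r :: rs).drop 16).length % 16 := by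
            simp only [List.length_drop]; omega
          rw [hn, hmod, altLoop_cons, htl]
          rw [if_neg (by omega)]
          generalize hnn : (((c + 16 : Nat) : Int) + (((r :: rs).drop 16).length : Int)) = n0
          conv_lhs => rw [← List.take_append_drop 16 (r :: rs)]
          rw [List.foldl_append]
          rw [foldl_full n0 _ c "" _ (by rw [htl]; omega)]
          simp only [htl]
          by_cases h16 : (r :: rs).length = 16
          · -- final full chunk: nothing remains
            have hdnil : (r :: rs).drop 16 = [] := List.drop_eq_nil_of_le (by omega)
            have hn0 : n0 = ((c + 16 : Nat) : Int) := by
              rw [← hnn, hdnil]; simp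
            rw [hdnil]
            simp only [List.foldl_nil, List.length_nil]
            rw [if_neg (by rw [hn0]; omega)]
            unfold finalize
            simp only
            rw [if_neg (by simp)]
            simp [spaces, altLoop_nil, String.append_assoc]
          · -- more chunks follow
            have hdne : (r :: rs).drop 16 ≠ [] := by
              intro hnil
              have := congrArg List.length hnil
              simp only [List.length_drop, List.length_nil] at this
              omega
            rw [if_pos (by rw [← hnn]; simp only [List.length_drop, List.length_cons] at hlen h16 ⊢; omega)]
            have hBIG : out ++ pyHexFmt 4 (c : Int) ++ "  " ++ chunkHex ((r :: rs).take 16) ++ " "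
                  ++ ("" ++ chunkAsc ((r :: rs).take 16)) ++ "\n"
                  ++ (pyHexFmt 4 ((c + 16 : Nat) : Int) ++ "  ")
                = (out ++ pyHexFmt 4 (c : Int) ++ "  " ++ chunkHex ((r :: rs).take 16) ++ " "
                    ++ chunkAsc ((r :: rs).take 16) ++ "\n") ++ pyHexFmt 4 ((c + 16 : Nat) : Int) ++ "  " := by
              simp [String.append_assoc]
            rw [← hnn, hBIG]
            rw [ih ((r :: rs).drop 16) (c + 16) _
                  (by simp only [List.length_drop, List.length_cons] at *; omega)
                  hdne (by omega)]
            simp [String.append_assoc]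

-- hexasc on a nonempty buffer equals altLoop plus A's extra " \n" exactly when 16 ∣ length
theorem hexasc_eq (b : Int) (bs : List Int) :
    hexasc (b :: bs)
      = some (altLoop (b :: bs) 0 ++ (if (b :: bs).length % 16 = 0 then " \n" else "")) := by
  have hm := main_loop (b :: bs).length (b :: bs) 0 "" le_rfl (by simp) (by norm_num)
  simp only [Nat.cast_zero, zero_add, String.empty_append, List.length_cons] at hm
  simp only [hexasc, List.length_cons]
  rw [if_neg (show ¬(((bs.length + 1 : Nat) : Int) = 0) from by push_cast; omega)]
  rw [show ("0000  " : String) = pyHexFmt 4 (0 : Int) ++ "  " from by decide]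
  refine congrArg some ?_
  show finalize (List.foldl (stepA ((bs.length + 1 : Nat) : Int))
        (0, "", pyHexFmt 4 (0 : Int) ++ "  ") (b :: bs)) = _
  rw [hm]

-- ===== VERDICT (by name: the statements are the Claim_ definitions above) =====
theorem hexasc_spec : Claim_unchanged_hexasc := by
  intro buf _ hnd
  cases buf with
  | nil => rfl
  | cons b bs =>
      rw [hexasc_eq]
      have h16 : ¬ ((b :: bs).length % 16 = 0) := by
        intro h
        exact hnd ⟨by simp, h⟩
      rw [if_neg h16]
      simp [hexasc_alt]

theorem altLoop_witness :
    altLoop pvDiffWitness_hexasc 0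
      = "0000  00 00 00 00 00 00 00 00 00 00 00 00 00 00 00 00  ................\n" := by
  rw [show altLoop pvDiffWitness_hexasc 0
        = altLoop pvDiffWitness_hexasc 0 from rfl]
  rw [pvDiffWitness_hexasc, altLoop]
  simp only [List.take, List.drop]
  rw [altLoop_nil]
  decide

theorem hexasc_changed : Claim_changed_hexasc := by
  unfold Claim_changed_hexasc
  refine ⟨by decide, by decide, ?_, ?_, by decide⟩
  · rw [show pvDiffWitness_hexasc = ((0:Int) :: [0,0,0,0,0,0,0,0,0,0,0,0,0,0,0]) from rfl, hexasc_eq]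
    rw [show ((0:Int) :: [0,0,0,0,0,0,0,0,0,0,0,0,0,0,0]) = pvDiffWitness_hexasc from rfl]
    rw [altLoop_witness]
    decide
  · rw [hexasc_alt]
    rw [if_neg (by decide)]
    rw [altLoop_witness]
    rfl

theorem hexasc_tight : Claim_exact_hexasc := by
  intro buf _ hd
  cases buf with
  | nil => exact absurd rfl hd.1
  | cons b bs =>
      rw [hexasc_eq, if_pos hd.2]
      simp only [hexasc_alt, List.length_cons]
      rw [if_neg (by omega)]
      intro h
      have h2 := congrArg (fun o => (Option.getD o "").length) h
      simp only [Option.getD_some, String.length_append] at h2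
      have : (" \n" : String).length = 2 := by decide
      omega
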